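-- pv_equiv track=rewrite | github.com/gregoryann/Python-Beginner-Examples | +1500 Python Challenges/Easy/Longest Sequence of Consecutive Zeroes.py | longest_zero
-- ===== SOURCE A (Python) =====
-- def longest_zero(s):
--     ender = s + '1'
--     list1 = []
--     stringy = ""
--     counter = 0
--     for i in ender:
--         if i =='0':
--             counter = counter + 1
--         elif i == '1':
--             list1.append(counter)
--             counter = 0
--     maxy = max(list1)
--     for i in range(maxy):
--         stringy = stringy + "0"
--
--     return stringy
-- ===== SOURCE B (Python) =====
-- def longest_zero(s):
--     # max over per-segment zero counts; split('1') always yields >= 1 segment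
--     return '0' * max(seg.count('0') for seg in s.split('1'))
-- ===== Notes on version B (the rewrite author's own statement) =====
-- stated objective: simpler
-- what changed: Replaces A's character-by-character counter/list state machine plus a string-building loop with a one-liner: split the string on '1', take the max of each segment's '0'-count, and repeat '0' that many times.
import Mathlib
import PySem

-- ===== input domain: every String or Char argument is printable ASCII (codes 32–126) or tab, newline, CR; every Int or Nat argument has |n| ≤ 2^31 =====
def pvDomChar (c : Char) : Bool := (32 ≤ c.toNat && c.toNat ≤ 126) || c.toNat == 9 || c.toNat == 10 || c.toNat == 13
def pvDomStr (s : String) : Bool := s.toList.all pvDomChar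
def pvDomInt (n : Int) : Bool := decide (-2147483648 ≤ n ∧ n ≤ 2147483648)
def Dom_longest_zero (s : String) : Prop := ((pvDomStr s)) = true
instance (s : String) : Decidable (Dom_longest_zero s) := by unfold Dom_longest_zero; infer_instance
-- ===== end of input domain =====

-- B replaces A's per-character counter state machine by split('1') + max of per-segment '0'-counts (simpler one-liner).

-- ===== PORT A =====
-- the loop body of A: '0' bumps the counter, '1' flushes it into list1, anything else is ignored
def lzStep (st : List Int × Int) (i : Char) : List Int × Int :=
  if i = '0' then (st.1, st.2 + 1)
  else if i = '1' then (st.1 ++ [st.2], 0)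
  else st

def longest_zero (s : String) : String :=
  -- ender = s + '1'; the for-loop over ender yields (list1, counter); maxy = max(list1)
  -- (Python max raises on [], but list1 is never empty since ender ends in '1')
  match PySem.List.max? ((s.toList ++ ['1']).foldl lzStep ([], (0 : Int))).1 (fun x => x) with
  | none => ""
  | some maxy =>
      -- for i in range(maxy): stringy = stringy + "0"  (string built as List Char)
      String.ofList ((PySem.List.pyRange 0 maxy 1).foldl (fun acc _ => acc ++ ['0']) [])

-- ===== PORT B =====
def longest_zero_alt (s : String) : String :=
  -- max(...) over the (always nonempty) list of per-segment '0'-counts; '0' * maxy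
  match PySem.List.max? ((PySem.Chars.splitOn s.toList ['1']).map (fun seg => PySem.Chars.count seg ['0'])) (fun x => x) with
  | none => ""
  | some maxy => String.ofList (List.replicate maxy '0')

-- ===== PRECONDITION & SPEC =====
def Spec_longest_zero (s : String) (out : String) : Prop := out = longest_zero_alt s
instance (s : String) (out : String) : Decidable (Spec_longest_zero s out) := by unfold Spec_longest_zero; infer_instance

-- ===== CLAIM (what is proved, stated in full; the proofs are below) =====
def Claim_equal_longest_zero : Prop := ∀ (s : String), Dom_longest_zero s → Spec_longest_zero s (longest_zero s)

-- ===== LEMMAS AND PROOFS =====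

-- reference split of a char list on the single separator '1'
def split1 : List Char → List (List Char)
  | [] => [[]]
  | c :: t =>
      if c = '1' then [] :: split1 t
      else match split1 t with
           | [] => [[c]]
           | h :: r => (c :: h) :: r

def mapFirst (f : List Char → List Char) : List (List Char) → List (List Char)
  | [] => []
  | h :: r => f h :: r

theorem split1_ne_nil (l : List Char) : split1 l ≠ [] := by
  cases l with
  | nil => simp [split1]
  | cons c t =>
      simp only [split1]
      split
      · simp
      · cases h : split1 t <;> simp

theorem splitOn_go_eq (l : List Char) : ∀ (fuel : Nat) (cu : List Char) (ac : List (List Char)),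
    l.length < fuel →
    PySem.Chars.splitOn.go ['1'] fuel l cu ac =
      ac.reverse ++ mapFirst (fun h => cu.reverse ++ h) (split1 l) := by
  induction l with
  | nil =>
      intro fuel cu ac hf
      cases fuel with
      | zero => omega
      | succ f => simp [PySem.Chars.splitOn.go, split1, mapFirst]
  | cons c t ih =>
      intro fuel cu ac hf
      cases fuel with
      | zero => simp at hf
      | succ f =>
          have hprefix : List.isPrefixOf ['1'] (c :: t) = (c == '1') := by
            simp [List.isPrefixOf]
            exact eq_comm
          by_cases hc : c = '1'
          · subst hc
            rw [show PySem.Chars.splitOn.go ['1'] (f+1) ('1' :: t) cu ac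
                  = PySem.Chars.splitOn.go ['1'] f t [] (cu.reverse :: ac) by
                  simp [PySem.Chars.splitOn.go, hprefix]]
            rw [ih f [] (cu.reverse :: ac) (by simpa using Nat.lt_of_succ_lt_succ hf)]
            cases h : split1 t with
            | nil => exact absurd h (split1_ne_nil t)
            | cons h0 r => simp [split1, mapFirst, h]
          · rw [show PySem.Chars.splitOn.go ['1'] (f+1) (c :: t) cu ac
                  = PySem.Chars.splitOn.go ['1'] f t (c :: cu) ac by
                  simp [PySem.Chars.splitOn.go, hprefix, hc]]
            rw [ih f (c :: cu) ac (by simpa using Nat.lt_of_succ_lt_succ hf)]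
            cases h : split1 t with
            | nil => exact absurd h (split1_ne_nil t)
            | cons h0 r => simp [split1, hc, mapFirst, h]

theorem splitOn_eq_split1 (l : List Char) : PySem.Chars.splitOn l ['1'] = split1 l := by
  unfold PySem.Chars.splitOn
  rw [splitOn_go_eq l (l.length + 1) [] [] (by omega)]
  cases h : split1 l with
  | nil => exact absurd h (split1_ne_nil l)
  | cons h0 r => simp [mapFirst]

theorem count_go_eq (l : List Char) : ∀ (fuel acc : Nat), l.length ≤ fuel →
    PySem.Chars.count.go ['0'] fuel l acc = acc + l.count '0' := by
  induction l with
  | nil =>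
      intro fuel acc _
      cases fuel <;> simp [PySem.Chars.count.go]
  | cons c t ih =>
      intro fuel acc hf
      cases fuel with
      | zero => simp at hf
      | succ f =>
          have hprefix : List.isPrefixOf ['0'] (c :: t) = (c == '0') := by
            simp [List.isPrefixOf]
            exact eq_comm
          by_cases hc : c = '0'
          · subst hc
            rw [show PySem.Chars.count.go ['0'] (f+1) ('0' :: t) acc
                  = PySem.Chars.count.go ['0'] f t (acc + 1) by
                  simp [PySem.Chars.count.go, hprefix]]
            rw [ih f (acc + 1) (by simpa using Nat.lt_succ_iff.mp (Nat.lt_of_lt_of_le (Nat.lt_succ_of_le le_rfl) (by simpa using hf)))]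
            simp
            omega
          · rw [show PySem.Chars.count.go ['0'] (f+1) (c :: t) acc
                  = PySem.Chars.count.go ['0'] f t acc by
                  simp [PySem.Chars.count.go, hprefix, hc]]
            rw [ih f acc (by simpa using Nat.lt_succ_iff.mp (by simpa using hf))]
            simp [hc]

theorem count_eq_count (l : List Char) : PySem.Chars.count l ['0'] = l.count '0' := by
  unfold PySem.Chars.count
  rw [if_neg (by simp)]
  rw [count_go_eq l l.length 0 le_rfl]
  simp

-- prepend c to the first entry of an Int list (A's pending counter joins the first segment's count)
def addFirst (c : Int) : List Int → List Int
  | [] => [c]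
  | h :: t => (c + h) :: t

theorem foldE (l : List Char) : ∀ (acc : List Int) (c : Int),
    (l.foldl lzStep (acc, c)).1 ++ [(l.foldl lzStep (acc, c)).2] =
      acc ++ addFirst c ((split1 l).map (fun seg => (seg.count '0' : Int))) := by
  induction l with
  | nil => intro acc c; simp [split1, addFirst]
  | cons i t ih =>
      intro acc c
      by_cases h0 : i = '0'
      · subst h0
        have : lzStep (acc, c) '0' = (acc, c + 1) := by simp [lzStep]
        rw [List.foldl_cons, this, ih acc (c + 1)]
        cases h : split1 t with
        | nil => exact absurd h (split1_ne_nil t)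
        | cons hd r =>
            simp [split1, h, addFirst]
            ring
      · by_cases h1 : i = '1'
        · subst h1
          have : lzStep (acc, c) '1' = (acc ++ [c], 0) := by simp [lzStep]
          rw [List.foldl_cons, this, ih (acc ++ [c]) 0]
          cases h : split1 t with
          | nil => exact absurd h (split1_ne_nil t)
          | cons hd r => simp [split1, h, addFirst]
        · have : lzStep (acc, c) i = (acc, c) := by simp [lzStep, h0, h1]
          rw [List.foldl_cons, this, ih acc c]
          cases h : split1 t with
          | nil => exact absurd h (split1_ne_nil t)
          | cons hd r => simp [split1, h, h1, addFirst, h0]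

-- A's list1 (after the appended '1') is exactly the per-segment '0'-counts of split1
theorem list1_eq (l : List Char) :
    ((l ++ ['1']).foldl lzStep ([], (0 : Int))).1 =
      (split1 l).map (fun seg => (seg.count '0' : Int)) := by
  rw [List.foldl_append]
  have hstep : lzStep (l.foldl lzStep ([], (0 : Int))) '1'
      = ((l.foldl lzStep ([], (0 : Int))).1 ++ [(l.foldl lzStep ([], (0 : Int))).2], 0) := by
    simp [lzStep]
  simp only [List.foldl_cons, List.foldl_nil, hstep]
  rw [foldE l [] 0]
  cases h : split1 l with
  | nil => exact absurd h (split1_ne_nil l)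
  | cons hd r => simp [addFirst]

theorem foldl_max_cast (t : List Nat) : ∀ (h : Nat),
    (t.map (fun n : Nat => (n : Int))).foldl max ((h : Nat) : Int) = ((t.foldl max h : Nat) : Int) := by
  induction t with
  | nil => intro h; simp
  | cons x r ih => intro h; simp only [List.map_cons, List.foldl_cons, ← Nat.cast_max]; exact ih (max h x)

-- ===== VERDICT (by name: the statement is the Claim_ definition above) =====
theorem longest_zero_spec : Claim_equal_longest_zero := by
  intro s _
  unfold Spec_longest_zero longest_zero longest_zero_alt
  rw [list1_eq s.toList, splitOn_eq_split1 s.toList]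
  have hcnt : (split1 s.toList).map (fun seg => PySem.Chars.count seg ['0'])
      = (split1 s.toList).map (fun seg => seg.count '0') := by
    simp [count_eq_count]
  rw [hcnt]
  cases h : split1 s.toList with
  | nil => exact absurd h (split1_ne_nil s.toList)
  | cons hd r =>
      simp only [List.map_cons, PySem.List.max?_id_cons]
      have hc : (r.map (fun seg => ((seg.count '0' : Nat) : Int))).foldl max ((hd.count '0' : Nat) : Int)
            = (((r.map (fun seg => seg.count '0')).foldl max (hd.count '0') : Nat) : Int) := by
        have := foldl_max_cast (r.map (fun seg => seg.count '0')) (hd.count '0')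
        simpa [List.map_map, Function.comp] using this
      simp [PySem.List.length_pyRange_one, hc]
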